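-- pv_equiv track=rewrite | github.com/thoonk/Algorithm | Programmers/Python/Implementation/120956.py | solution
-- ===== SOURCE A (Python) =====
-- from itertools import permutations
--
-- def solution(babbling):
--     answer = 0
--     pronounces = ['aya', 'ye', 'woo', 'ma']
--     word = []
--
--     for i in range(1, 5):
--         for char in permutations(pronounces, i):
--             word.append(''.join(char))
--
--     for babble in babbling:
--         if babble in word:
--             answer += 1
--
--     return answer
-- ===== SOURCE B (Python) =====
-- def solution(babbling):
--     def parse(s):
--         # greedily peel pronounceable units off the front; None if stuck
--         if s == "":
--             return []
--         for u in ("aya", "ye", "woo", "ma"):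
--             if s.startswith(u):
--                 rest = parse(s[len(u):])
--                 return None if rest is None else [u] + rest
--         return None
--
--     count = 0
--     for s in babbling:
--         units = parse(s)
--         if units is not None and units != [] and all(units.count(u) == 1 for u in units):
--             count += 1
--     return count
-- ===== Notes on version B (the rewrite author's own statement) =====
-- stated objective: alternative
-- what changed: B drops A's precomputed 64-word permutation table and instead greedily parses each babbling into units (the four units start with distinct letters, so parsing is deterministic), accepting iff the parse consumes the whole non-empty string with no unit repeated.
import Mathlib
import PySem

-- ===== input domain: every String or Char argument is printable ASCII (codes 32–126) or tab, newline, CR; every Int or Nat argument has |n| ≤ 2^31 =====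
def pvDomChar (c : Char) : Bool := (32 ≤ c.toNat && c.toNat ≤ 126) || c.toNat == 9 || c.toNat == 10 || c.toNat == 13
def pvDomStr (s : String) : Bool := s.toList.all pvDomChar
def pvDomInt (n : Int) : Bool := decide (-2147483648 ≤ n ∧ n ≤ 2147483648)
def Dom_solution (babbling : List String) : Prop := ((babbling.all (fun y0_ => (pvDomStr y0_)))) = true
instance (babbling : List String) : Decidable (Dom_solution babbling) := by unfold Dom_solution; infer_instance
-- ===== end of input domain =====

-- B replaces A's precomputed 64-word permutation table by a direct greedy parse of each
-- babbling into distinct units (objective: alternative algorithm, no table and no table scan).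

-- ===== PORT A =====
def solution (babbling : List String) : Int :=
  let pronounces : List String := ["aya", "ye", "woo", "ma"]
  let word : List String :=
    (PySem.List.pyRange 1 5 1).foldl (fun word i =>
      (PySem.List.permutations pronounces i.toNat).foldl
        (fun word char => word ++ [PySem.Str.join "" char]) word) []
  babbling.foldl (fun answer babble =>
    if word.contains babble then answer + 1 else answer) 0

-- ===== PORT B =====
-- Source B's parse: the loop 'for u in ("aya","ye","woo","ma"): if s.startswith(u): …'
-- unrolled into the ordered prefix patterns (exact: prefix test on a literal unit,
-- then recursion on the remainder s[len(u):]).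
def parseUnits : List Char → Option (List String)
  | [] => some []
  | 'a' :: 'y' :: 'a' :: rest => (parseUnits rest).map (fun r => "aya" :: r)
  | 'y' :: 'e' :: rest => (parseUnits rest).map (fun r => "ye" :: r)
  | 'w' :: 'o' :: 'o' :: rest => (parseUnits rest).map (fun r => "woo" :: r)
  | 'm' :: 'a' :: rest => (parseUnits rest).map (fun r => "ma" :: r)
  | _ => none

def okBabble (s : String) : Bool :=
  match parseUnits s.toList with
  | none => false
  | some units => units != [] && units.all (fun u => PySem.List.count units u == 1)

def solution_alt (babbling : List String) : Int :=
  babbling.foldl (fun count s => if okBabble s then count + 1 else count) 0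

-- ===== PRECONDITION & SPEC =====
def Spec_solution (babbling : List String) (out : Int) : Prop := out = solution_alt babbling
instance (babbling : List String) (out : Int) : Decidable (Spec_solution babbling out) := by unfold Spec_solution; infer_instance

-- ===== CLAIM (what is proved, stated in full; the proofs are below) =====
def Claim_equal_solution : Prop := ∀ (babbling : List String), Dom_solution babbling → Spec_solution babbling (solution babbling)

-- ===== LEMMAS AND PROOFS =====

-- A's word table, evaluated to its 64 elements.
def wordLit : List String :=
  ["aya", "ye", "woo", "ma", "ayaye", "ayawoo", "ayama", "yeaya", "yewoo", "yema",
   "wooaya", "wooye", "wooma", "maaya", "maye", "mawoo", "ayayewoo", "ayayema",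
   "ayawooye", "ayawooma", "ayamaye", "ayamawoo", "yeayawoo", "yeayama", "yewooaya",
   "yewooma", "yemaaya", "yemawoo", "wooayaye", "wooayama", "wooyeaya", "wooyema",
   "woomaaya", "woomaye", "maayaye", "maayawoo", "mayeaya", "mayewoo", "mawooaya",
   "mawooye", "ayayewooma", "ayayemawoo", "ayawooyema", "ayawoomaye", "ayamayewoo",
   "ayamawooye", "yeayawooma", "yeayamawoo", "yewooayama", "yewoomaaya", "yemaayawoo",
   "yemawooaya", "wooayayema", "wooayamaye", "wooyeayama", "wooyemaaya", "woomaayaye",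
   "woomayeaya", "maayayewoo", "maayawooye", "mayeayawoo", "mayewooaya", "mawooayaye",
   "mawooyeaya"]

lemma word_val :
    ((PySem.List.pyRange 1 5 1).foldl (fun word i =>
      (PySem.List.permutations ["aya", "ye", "woo", "ma"] i.toNat).foldl
        (fun word char => word ++ [PySem.Str.join "" char]) word) []) = wordLit := by
  decide

lemma join_empty_cons (u : String) (us : List String) :
    (PySem.Str.join "" (u :: us)).toList = u.toList ++ (PySem.Str.join "" us).toList := by
  cases us with
  | nil => simp [PySem.Str.toList_join, PySem.Chars.join_singleton, PySem.Chars.join_nil]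
  | cons v vs =>
      simp [PySem.Str.toList_join, PySem.Chars.join_cons_cons]

-- a successful parse reconstructs the string as the concatenation of its units,
-- and every parsed unit is one of the four pronounceable units
lemma parse_sound (cs : List Char) (us : List String) (h : parseUnits cs = some us) :
    cs = (PySem.Str.join "" us).toList ∧ ∀ u ∈ us, u ∈ (["aya", "ye", "woo", "ma"] : List String) := by
  induction cs using parseUnits.induct generalizing us with
  | case1 =>
      simp [parseUnits] at h
      subst h
      simp [PySem.Str.toList_join, PySem.Chars.join_nil]
  | case2 rest ih =>
      simp only [parseUnits, Option.map_eq_some_iff] at h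
      obtain ⟨us', hp, rfl⟩ := h
      obtain ⟨hcs, hmem⟩ := ih us' hp
      refine ⟨?_, ?_⟩
      · rw [join_empty_cons, ← hcs]; rfl
      · intro u hu
        rcases List.mem_cons.mp hu with h | hu
        · subst h; decide
        · exact hmem u hu
  | case3 rest ih =>
      simp only [parseUnits, Option.map_eq_some_iff] at h
      obtain ⟨us', hp, rfl⟩ := h
      obtain ⟨hcs, hmem⟩ := ih us' hp
      refine ⟨?_, ?_⟩
      · rw [join_empty_cons, ← hcs]; rfl
      · intro u hu
        rcases List.mem_cons.mp hu with h | hu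
        · subst h; decide
        · exact hmem u hu
  | case4 rest ih =>
      simp only [parseUnits, Option.map_eq_some_iff] at h
      obtain ⟨us', hp, rfl⟩ := h
      obtain ⟨hcs, hmem⟩ := ih us' hp
      refine ⟨?_, ?_⟩
      · rw [join_empty_cons, ← hcs]; rfl
      · intro u hu
        rcases List.mem_cons.mp hu with h | hu
        · subst h; decide
        · exact hmem u hu
  | case5 rest ih =>
      simp only [parseUnits, Option.map_eq_some_iff] at h
      obtain ⟨us', hp, rfl⟩ := h
      obtain ⟨hcs, hmem⟩ := ih us' hp
      refine ⟨?_, ?_⟩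
      · rw [join_empty_cons, ← hcs]; rfl
      · intro u hu
        rcases List.mem_cons.mp hu with h | hu
        · subst h; decide
        · exact hmem u hu
  | case6 cs h1 h2 h3 h4 h5 =>
      rw [parseUnits] at h
      · exact absurd h (by simp)
      all_goals assumption

-- all length-n tuples over a base list
def tuples : Nat → List String → List (List String)
  | 0, _ => [[]]
  | n + 1, base => base.flatMap (fun x => (tuples n base).map (fun l => x :: l))

lemma mem_tuples (n : Nat) (base l : List String) (hlen : l.length = n)
    (hsub : ∀ x ∈ l, x ∈ base) : l ∈ tuples n base := by
  induction n generalizing l with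
  | zero => simp [tuples, List.length_eq_zero_iff.mp hlen]
  | succ n ih =>
      cases l with
      | nil => simp at hlen
      | cons x t =>
          simp only [tuples, List.mem_flatMap, List.mem_map]
          exact ⟨x, hsub x (by simp), t,
            ih t (by simpa using hlen) (fun y hy => hsub y (by simp [hy])), rfl⟩

-- every non-repeating nonempty tuple of units joins to a word of A's table (one finite check)
set_option maxRecDepth 8192 in
lemma tuples_join_mem :
    ((tuples 1 ["aya", "ye", "woo", "ma"] ++ tuples 2 ["aya", "ye", "woo", "ma"] ++
      tuples 3 ["aya", "ye", "woo", "ma"] ++ tuples 4 ["aya", "ye", "woo", "ma"]).all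
      (fun us => !decide us.Nodup || wordLit.contains (PySem.Str.join "" us))) = true := by
  decide

-- every word of A's table is accepted by B's parse (one finite check)
lemma word_ok : wordLit.all okBabble = true := by decide

lemma contains_eq_ok (b : String) : wordLit.contains b = okBabble b := by
  rw [List.contains_eq_mem]
  by_cases hb : b ∈ wordLit
  · simp only [hb, decide_true]
    exact (List.all_eq_true.mp word_ok b hb).symm
  · simp only [hb, decide_false]
    cases hok : okBabble b with
    | false => rfl
    | true =>
        exfalso
        unfold okBabble at hok
        cases hp : parseUnits b.toList with
        | none => rw [hp] at hok; simp at hok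
        | some us =>
            rw [hp] at hok
            simp only [Bool.and_eq_true, bne_iff_ne, ne_eq, List.all_eq_true, beq_iff_eq] at hok
            obtain ⟨hne, hcnt⟩ := hok
            obtain ⟨hjoin, hsub⟩ := parse_sound _ _ hp
            have hnd : us.Nodup := by
              rw [List.nodup_iff_count_eq_one]
              intro a ha
              simpa [PySem.List.count_eq] using hcnt a ha
            have hb' : b = PySem.Str.join "" us := String.toList_inj.mp hjoin
            have hlen4 : us.length ≤ 4 := by
              have := (List.Nodup.subperm hnd (fun x hx => hsub x hx)).length_le
              simpa using this
            have hlen1 : 1 ≤ us.length := by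
              cases us with
              | nil => exact absurd rfl hne
              | cons _ _ => simp
            have hmem : us ∈ tuples 1 ["aya", "ye", "woo", "ma"] ++
                tuples 2 ["aya", "ye", "woo", "ma"] ++ tuples 3 ["aya", "ye", "woo", "ma"] ++
                tuples 4 ["aya", "ye", "woo", "ma"] := by
              interval_cases h : us.length <;>
                simp only [List.mem_append] <;>
                [skip; skip; skip; skip] <;>
                first
                | exact Or.inl (Or.inl (Or.inl (mem_tuples 1 _ _ h hsub)))
                | exact Or.inl (Or.inl (Or.inr (mem_tuples 2 _ _ h hsub)))
                | exact Or.inl (Or.inr (mem_tuples 3 _ _ h hsub))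
                | exact Or.inr (mem_tuples 4 _ _ h hsub)
            have := List.all_eq_true.mp tuples_join_mem us hmem
            simp only [hnd, decide_true, Bool.not_true, Bool.false_or] at this
            rw [List.contains_eq_mem] at this
            exact hb (hb' ▸ of_decide_eq_true this)

-- ===== VERDICT (by name: the statement is the Claim_ definition above) =====
theorem solution_spec : Claim_equal_solution := by
  intro babbling _
  show solution babbling = solution_alt babbling
  simp only [solution, solution_alt, word_val, contains_eq_ok]
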